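-- pv_equiv track=rewrite | github.com/rudrajyotib/leetcode_py | medium/tree/btree_nodes_apart_distance_k.py | is_k_node_apart
-- ===== SOURCE A (Python) =====
-- def is_k_node_apart(path: str, target_path: str, k: int) -> bool:
--     nodes_common = 0
--     if len(path) < len(target_path):
--         for node in path:
--             if target_path[nodes_common] == node:
--                 nodes_common += 1
--             else:
--                 break
--         return ((len(path) + len(target_path)) - 2 * nodes_common) == k
--     else:
--         for node in target_path:
--             if path[nodes_common] == node:
--                 nodes_common += 1
--             else:
--                 break
--         return ((len(path) + len(target_path)) - 2 * nodes_common) == k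
-- ===== SOURCE B (Python) =====
-- def is_k_node_apart(path: str, target_path: str, k: int) -> bool:
--     # Strip the shared prefix recursively; once it is gone, the distance
--     # between the two nodes is just the sum of the remaining path lengths.
--     if path and target_path and path[0] == target_path[0]:
--         return is_k_node_apart(path[1:], target_path[1:], k)
--     return len(path) + len(target_path) == k
-- ===== Notes on version B (the rewrite author's own statement) =====
-- stated objective: simpler
-- what changed: Replaces A's length-comparing if/else with an indexed counting loop and the len(a)+len(b)-2*common formula by a recursion that strips the shared prefix off both strings and, at the first mismatch, returns len(path)+len(target_path)==k directly - no counter and no 2*common arithmetic.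
import Mathlib
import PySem

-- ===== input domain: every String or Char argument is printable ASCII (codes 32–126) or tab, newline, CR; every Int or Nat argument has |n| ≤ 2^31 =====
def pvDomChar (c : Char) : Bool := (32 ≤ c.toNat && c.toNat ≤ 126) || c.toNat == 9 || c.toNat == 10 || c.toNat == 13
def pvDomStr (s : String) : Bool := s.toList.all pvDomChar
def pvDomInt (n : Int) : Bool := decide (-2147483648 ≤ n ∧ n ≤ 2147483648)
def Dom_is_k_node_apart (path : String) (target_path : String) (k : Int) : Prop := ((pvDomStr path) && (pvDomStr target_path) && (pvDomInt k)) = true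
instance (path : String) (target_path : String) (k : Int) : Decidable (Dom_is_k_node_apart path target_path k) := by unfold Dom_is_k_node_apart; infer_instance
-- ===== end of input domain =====

-- B replaces A's counting loops and the len+len-2*common formula by a recursion that strips the
-- shared prefix and sums the remaining lengths; objective: simpler. Return value only, no mutation.

-- ===== PORT A =====
-- A's for-loop with break: iterate the shorter string, index the other by nodes_common.
def pvLoopA (other : List Char) (iter : List Char) (nc : Int) : Int :=
  match iter with
  | [] => nc
  | node :: rest =>
    match PySem.List.pyGet? other nc with
    | some ch => if ch == node then pvLoopA other rest (nc + 1) else nc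
    | none => nc

def is_k_node_apart (path : String) (target_path : String) (k : Int) : Bool :=
  let pl := path.toList
  let tl := target_path.toList
  if pl.length < tl.length then
    ((pl.length : Int) + tl.length - 2 * pvLoopA tl pl 0) == k
  else
    ((pl.length : Int) + tl.length - 2 * pvLoopA pl tl 0) == k

-- ===== PORT B =====
-- Source B's recursion: strip equal heads, otherwise compare the sum of remaining lengths with k.
def pvStripRec : List Char → List Char → Int → Bool
  | a :: as_, b :: bs, k =>
    if a == b then pvStripRec as_ bs k
    else (((a :: as_).length : Int) + ((b :: bs).length : Int)) == k
  | p, t, k => ((p.length : Int) + (t.length : Int)) == k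

def is_k_node_apart_alt (path : String) (target_path : String) (k : Int) : Bool :=
  pvStripRec path.toList target_path.toList k

-- ===== PRECONDITION & SPEC =====
def Spec_is_k_node_apart (path : String) (target_path : String) (k : Int) (out : Bool) : Prop := out = is_k_node_apart_alt path target_path k
instance (path : String) (target_path : String) (k : Int) (out : Bool) : Decidable (Spec_is_k_node_apart path target_path k out) := by unfold Spec_is_k_node_apart; infer_instance

-- ===== CLAIM =====
def Claim_equal_is_k_node_apart : Prop := ∀ (path : String) (target_path : String) (k : Int), Dom_is_k_node_apart path target_path k → Spec_is_k_node_apart path target_path k (is_k_node_apart path target_path k)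

-- ===== LEMMAS AND PROOFS =====

-- common-prefix length, the bridge between the two programs
def pvCommon : List Char → List Char → Int
  | a :: as_, b :: bs => if a == b then 1 + pvCommon as_ bs else 0
  | _, _ => 0

theorem pvCommon_comm (xs ys : List Char) : pvCommon xs ys = pvCommon ys xs := by
  induction xs generalizing ys with
  | nil => cases ys <;> rfl
  | cons a as_ ih =>
    cases ys with
    | nil => rfl
    | cons b bs =>
      simp only [pvCommon, ih]
      by_cases h : a = b
      · subst h; simp
      · simp [h, Ne.symm h]

theorem pvStripRec_eq (xs ys : List Char) (k : Int) :
    pvStripRec xs ys k = (((xs.length : Int) + ys.length - 2 * pvCommon xs ys) == k) := by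
  induction xs generalizing ys with
  | nil => cases ys <;> simp [pvStripRec, pvCommon]
  | cons a as_ ih =>
    cases ys with
    | nil => simp [pvStripRec, pvCommon]
    | cons b bs =>
      by_cases h : a = b
      · subst h
        simp only [pvStripRec, pvCommon, ih]
        have : ((as_.length : Int) + bs.length - 2 * pvCommon as_ bs)
             = (((a :: as_).length : Int) + (a :: bs).length - 2 * (1 + pvCommon as_ bs)) := by
          simp; ring
        rw [this]; simp
      · simp [pvStripRec, pvCommon, h]

theorem pvLoopA_eq (xs ys : List Char) (n : Nat) (h : n + xs.length ≤ ys.length) :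
    pvLoopA ys xs (n : Int) = (n : Int) + pvCommon xs (ys.drop n) := by
  induction xs generalizing n with
  | nil => simp [pvLoopA, pvCommon]
  | cons c cs ih =>
    have hn : n < ys.length := by simp at h; omega
    have hdrop : ys.drop n = ys[n] :: ys.drop (n + 1) := List.drop_eq_getElem_cons hn
    simp only [pvLoopA, PySem.List.pyGet?_natCast, List.getElem?_eq_getElem hn, hdrop]
    by_cases hc : ys[n] = c
    · have hcast : ((n : Int) + 1) = ((n + 1 : Nat) : Int) := by push_cast; ring
      rw [if_pos (by simp [hc]), hcast, ih (n + 1) (by simp at h ⊢; omega)]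
      simp [pvCommon, hc]
      ring
    · rw [if_neg (by simp [hc])]
      simp [pvCommon]
      intro hh; exact absurd hh.symm hc

-- ===== VERDICT =====
theorem is_k_node_apart_spec : Claim_equal_is_k_node_apart := by
  intro path target_path k _
  unfold Spec_is_k_node_apart is_k_node_apart is_k_node_apart_alt
  rw [pvStripRec_eq]
  by_cases hlt : path.toList.length < target_path.toList.length
  · have h0 := pvLoopA_eq path.toList target_path.toList 0 (by omega)
    simp only [Nat.cast_zero, zero_add, List.drop_zero] at h0
    rw [if_pos hlt, h0]
  · have h0 := pvLoopA_eq target_path.toList path.toList 0 (by omega)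
    simp only [Nat.cast_zero, zero_add, List.drop_zero] at h0
    rw [if_neg hlt, h0, pvCommon_comm target_path.toList path.toList]
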